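-- pv_equiv track=rewrite | github.com/Estrangeling/Eleyi | discretize.py | brute_force_discretize
-- ===== SOURCE A (Python) =====
-- def brute_force_discretize(ranges):
--     numbers = {}
--     ranges.sort(key=lambda x: (x[0], -x[1]))
--     for start, end, data in ranges:
--         numbers |= {n: data for n in range(start, end + 1)}
--     numbers = list(numbers.items())
--     l = len(numbers)
--     i = 0
--     output = []
--     while i < l:
--         di = 0
--         curn, curv = numbers[i]
--         while i != l and curn + di == numbers[i][0] and curv == numbers[i][1]:
--             i += 1
--             di += 1
--         output.append((curn, numbers[i-1][0], curv))
--     return output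
-- ===== SOURCE B (Python) =====
-- def brute_force_discretize(ranges):
--     ranges.sort(key=lambda x: (x[0], -x[1]))
--     bounds = sorted({b for s, e, _ in ranges for b in (s, e + 1)})
--     output = []
--     for p, q in zip(bounds, bounds[1:]):
--         w = None
--         for s, e, d in ranges:
--             if s <= p <= e:
--                 w = d
--         if w is None:
--             continue
--         if output and output[-1][1] + 1 == p and output[-1][2] == w:
--             output[-1] = (output[-1][0], q - 1, w)
--         else:
--             output.append((p, q - 1, w))
--     return output
-- ===== Notes on version B (the rewrite author's own statement) =====
-- stated objective: faster
-- what changed: A paints every integer of every range into a dict and then re-scans all painted points to coalesce runs; B never enumerates points: it sweeps the sorted range endpoints, computes the winning value once per elementary segment, and coalesces contiguous equal-valued segments.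
import Mathlib
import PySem

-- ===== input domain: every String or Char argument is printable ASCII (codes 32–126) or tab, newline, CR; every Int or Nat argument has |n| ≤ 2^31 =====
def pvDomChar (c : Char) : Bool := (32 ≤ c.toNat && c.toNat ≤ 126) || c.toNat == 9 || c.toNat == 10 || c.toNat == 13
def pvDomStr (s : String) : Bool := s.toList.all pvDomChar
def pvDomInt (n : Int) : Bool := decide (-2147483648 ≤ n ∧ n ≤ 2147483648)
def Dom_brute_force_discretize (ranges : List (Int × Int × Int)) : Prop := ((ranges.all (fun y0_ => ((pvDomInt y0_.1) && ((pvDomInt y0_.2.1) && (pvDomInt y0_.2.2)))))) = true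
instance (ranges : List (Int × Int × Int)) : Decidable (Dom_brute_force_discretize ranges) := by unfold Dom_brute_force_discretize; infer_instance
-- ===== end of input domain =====

-- B replaces A's point-by-point painting of every integer in every range (cost grows with the total
-- integer span) by an endpoint sweep: per elementary segment between consecutive boundary points the
-- winning value is computed once and contiguous equal-valued segments are coalesced.  Both A and B
-- sort `ranges` in place (the same observable mutation); the theorem below is about the return value.
-- In A's port, Python's dict (an insertion-ordered O(1) hash map) is PvDict: the keys in insertion
-- order plus a search tree with each key's current value, and Python's O(1) list indexing in the
-- while loops is an Array; this keeps the port's step-for-step structure evaluable on large spans.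


-- ===== PORT A =====
structure PvDict where
  revKeys : List Int
  val : Std.TreeMap Int Int

def PvDict.empty : PvDict := ⟨[], Std.TreeMap.empty⟩

def PvDict.insert (d : PvDict) (k v : Int) : PvDict :=
  if d.val.contains k then ⟨d.revKeys, d.val.insert k v⟩
  else ⟨k :: d.revKeys, d.val.insert k v⟩

def PvDict.items (d : PvDict) : List (Int × Int) :=
  d.revKeys.reverse.map (fun k => (k, d.val.getD k 0))

def pvAInner (nums : Array (Int × Int)) (l curn curv : Int) (i di : Int) (fuel : Nat) : Int × Int :=
  match fuel with
  | 0 => (i, di)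
  | fuel + 1 =>
    if i ≠ l ∧ curn + di = (nums.getD i.toNat (0, 0)).1 ∧ curv = (nums.getD i.toNat (0, 0)).2 then
      pvAInner nums l curn curv (i + 1) (di + 1) fuel
    else (i, di)

def pvAOuter (nums : Array (Int × Int)) (l : Int) (i : Int) (output : List (Int × Int × Int)) (fuel : Nat) : List (Int × Int × Int) :=
  match fuel with
  | 0 => output
  | fuel + 1 =>
    if i < l then
      let cur := nums.getD i.toNat (0, 0)
      let r := pvAInner nums l cur.1 cur.2 i 0 (nums.size + 1)
      pvAOuter nums l r.1 (output ++ [(cur.1, (nums.getD (r.1 - 1).toNat (0, 0)).1, cur.2)]) fuel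
    else output

def brute_force_discretize (ranges : List (Int × Int × Int)) : List (Int × Int × Int) :=
  let rs := PySem.List.sorted2 ranges (fun x => x.1) (fun x => -x.2.1)
  -- numbers |= {n: data for n in range(start, end + 1)}: each pair of the comprehension is
  -- inserted in order (overwrite keeps the key's position, a new key is appended)
  let numbers : PvDict :=
    rs.foldl (fun d r => (PySem.List.pyRange r.1 (r.2.1 + 1) 1).foldl (fun d n => d.insert n r.2.2) d) PvDict.empty
  let nums := numbers.items
  -- the while loops run over nums; the array gives Python's O(1) list indexing, i stays in range
  pvAOuter nums.toArray (nums.length : Int) 0 [] nums.length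

-- ===== PORT B =====
def brute_force_discretize_alt (ranges : List (Int × Int × Int)) : List (Int × Int × Int) :=
  let rs := PySem.List.sorted2 ranges (fun x => x.1) (fun x => -x.2.1)
  let bounds := PySem.List.sorted (PySem.Set.ofList (rs.flatMap (fun r => [r.1, r.2.1 + 1]))) (fun b => b)
  (bounds.zip bounds.tail).foldl (fun output pq =>
    let w : Option Int := rs.foldl (fun w r => if r.1 ≤ pq.1 ∧ pq.1 ≤ r.2.1 then some r.2.2 else w) none
    match w with
    | none => output
    | some d =>
      match output.getLast? with
      | some last =>
        if last.2.1 + 1 = pq.1 ∧ last.2.2 = d then output.dropLast ++ [(last.1, pq.2 - 1, d)]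
        else output ++ [(pq.1, pq.2 - 1, d)]
      | none => output ++ [(pq.1, pq.2 - 1, d)]
  ) []

-- ===== PRECONDITION & SPEC =====
def Spec_brute_force_discretize (ranges : List (Int × Int × Int)) (out : List (Int × Int × Int)) : Prop := out = brute_force_discretize_alt ranges
instance (ranges : List (Int × Int × Int)) (out : List (Int × Int × Int)) : Decidable (Spec_brute_force_discretize ranges out) := by unfold Spec_brute_force_discretize; infer_instance

-- ===== CLAIM (what is proved, stated in full; the proofs are below) =====
def Claim_equal_brute_force_discretize : Prop := ∀ (ranges : List (Int × Int × Int)), Dom_brute_force_discretize ranges → Spec_brute_force_discretize ranges (brute_force_discretize ranges)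

-- ===== LEMMAS AND PROOFS =====
-- value at point n: data of the last range (in list order) containing n
def pvVal (rs : List (Int × Int × Int)) (n : Int) : Option Int :=
  rs.foldl (fun w r => if r.1 ≤ n ∧ n ≤ r.2.1 then some r.2.2 else w) none

def pvPtsF (f : Int → Option Int) (lo hi : Int) : List (Int × Int) :=
  (PySem.List.pyRange lo hi 1).filterMap (fun n => (f n).map (fun d => (n, d)))

theorem pvVal_foldl_acc (rs : List (Int × Int × Int)) (n : Int) (a : Option Int) :
    rs.foldl (fun w r => if r.1 ≤ n ∧ n ≤ r.2.1 then some r.2.2 else w) a = none ↔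
      a = none ∧ ∀ r ∈ rs, ¬ (r.1 ≤ n ∧ n ≤ r.2.1) := by
  induction rs generalizing a with
  | nil => simp
  | cons r rest ih =>
    simp only [List.foldl_cons, ih]
    by_cases h : r.1 ≤ n ∧ n ≤ r.2.1
    · simp [h]
    · simp [h]
      push Not at h
      intros
      omega

theorem pvVal_eq_none_iff (rs : List (Int × Int × Int)) (n : Int) :
    pvVal rs n = none ↔ ∀ r ∈ rs, ¬ (r.1 ≤ n ∧ n ≤ r.2.1) := by
  simp [pvVal, pvVal_foldl_acc]

theorem pvVal_append_singleton (ps : List (Int × Int × Int)) (r : Int × Int × Int) (n : Int) :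
    pvVal (ps ++ [r]) n = if r.1 ≤ n ∧ n ≤ r.2.1 then some r.2.2 else pvVal ps n := by
  simp [pvVal]

-- sorted2 by (start, -end) leaves the starts nondecreasing
theorem pvInsertBy_pairwise (x : Int × Int × Int) (ys : List (Int × Int × Int))
    (hys : ys.Pairwise (fun a b => a.1 ≤ b.1)) :
    (PySem.List.insertBy (fun a b => decide (a.1 < b.1) || (!decide (b.1 < a.1) && decide (-a.2.1 < -b.2.1))) x ys).Pairwise
      (fun a b => a.1 ≤ b.1) := by
  induction ys with
  | nil => simp [PySem.List.insertBy]
  | cons y ys ih =>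
    rw [PySem.List.insertBy]
    rcases List.pairwise_cons.1 hys with ⟨hy, hys'⟩
    split_ifs with h
    · simp only [Bool.or_eq_true, Bool.and_eq_true, Bool.not_eq_eq_eq_not, Bool.not_true,
        decide_eq_true_eq, decide_eq_false_iff_not] at h
      have hxy : x.1 ≤ y.1 := by omega
      refine List.pairwise_cons.2 ⟨?_, hys⟩
      intro z hz
      rcases List.mem_cons.1 hz with rfl | hz
      · exact hxy
      · exact le_trans hxy (hy z hz)
    · simp only [Bool.or_eq_true, Bool.and_eq_true, Bool.not_eq_eq_eq_not, Bool.not_true,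
        decide_eq_true_eq, decide_eq_false_iff_not] at h
      refine List.pairwise_cons.2 ⟨?_, ih hys'⟩
      intro z hz
      rcases (PySem.List.mem_insertBy _ x z ys).1 hz with rfl | hz
      · omega
      · exact hy z hz

theorem pvSorted2_pairwise (xs : List (Int × Int × Int)) :
    (PySem.List.sorted2 xs (fun x => x.1) (fun x => -x.2.1)).Pairwise (fun a b => a.1 ≤ b.1) := by
  show (List.foldl _ [] xs).Pairwise _
  generalize hacc : ([] : List (Int × Int × Int)) = acc
  have hpw : acc.Pairwise (fun a b => a.1 ≤ b.1) := by rw [← hacc]; simp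
  clear hacc
  induction xs generalizing acc with
  | nil => exact hpw
  | cons x xs ih => exact ih _ (pvInsertBy_pairwise x acc hpw)

-- head is minimal / getLast maximal in a strictly increasing list
theorem pvPairwise_head_le (b : Int) (rest : List Int) (h : (b :: rest).Pairwise (· < ·)) :
    ∀ x ∈ b :: rest, b ≤ x := by
  intro x hx
  rcases List.mem_cons.1 hx with rfl | hx
  · exact le_rfl
  · exact le_of_lt ((List.pairwise_cons.1 h).1 x hx)

theorem pvPairwise_getLast_ge (l : List Int) (h : l.Pairwise (· < ·)) (hne : l ≠ []) :
    ∀ x ∈ l, x ≤ l.getLast hne := by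
  induction l with
  | nil => simp at hne
  | cons b rest ih =>
    intro x hx
    cases rest with
    | nil => simp at hx; simp [hx, List.getLast]
    | cons c rest' =>
      rw [List.getLast_cons (by simp)]
      rcases List.mem_cons.1 hx with rfl | hx
      · exact le_trans (le_of_lt ((List.pairwise_cons.1 h).1 c (by simp)))
          (ih (List.pairwise_cons.1 h).2 (by simp) c (by simp))
      · exact ih (List.pairwise_cons.1 h).2 (by simp) x hx

-- adjacent pairs of a strictly increasing list
theorem pvZip_adjacent (l : List Int) (h : l.Pairwise (· < ·)) :
    ∀ pq ∈ l.zip l.tail, pq.1 < pq.2 ∧ ∀ x ∈ l, ¬ (pq.1 < x ∧ x < pq.2) := by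
  induction l with
  | nil => simp
  | cons b rest ih =>
    cases rest with
    | nil => simp
    | cons c rest' =>
      have hbc : b < c := (List.pairwise_cons.1 h).1 c (by simp)
      rintro ⟨p, q⟩ hpq
      simp only [List.tail_cons, List.zip_cons_cons] at hpq
      rcases List.mem_cons.1 hpq with heq | hpq2
      · cases heq
        refine ⟨hbc, ?_⟩
        intro x hx
        rcases List.mem_cons.1 hx with rfl | hx
        · omega
        · rcases List.mem_cons.1 hx with rfl | hx
          · omega
          · have := (List.pairwise_cons.1 (List.pairwise_cons.1 h).2).1 x hx
            omega
      · have ih' := ih (List.pairwise_cons.1 h).2 ⟨p, q⟩ (by simpa using hpq2)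
        refine ⟨ih'.1, ?_⟩
        intro x hx
        rcases List.mem_cons.1 hx with rfl | hx
        · have hp1 : p ∈ c :: rest' := (List.of_mem_zip hpq2).1
          have := (List.pairwise_cons.1 h).1 p hp1
          omega
        · exact ih'.2 x hx

-- concatenating the elementary segments tiles [head, getLast)
theorem pvRange_chain (l : List Int) (h : l.Pairwise (· < ·)) (hne : l ≠ []) :
    PySem.List.pyRange (l.head hne) (l.getLast hne) 1 =
      (l.zip l.tail).flatMap (fun pq => PySem.List.pyRange pq.1 pq.2 1) := by
  induction l with
  | nil => simp at hne
  | cons b rest ih =>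
    cases rest with
    | nil => simp [PySem.List.pyRange_one_eq_nil, List.getLast]
    | cons c rest' =>
      have hbc : b < c := (List.pairwise_cons.1 h).1 c (by simp)
      have hlast : c ≤ (c :: rest').getLast (by simp) :=
        pvPairwise_getLast_ge _ (List.pairwise_cons.1 h).2 (by simp) c (by simp)
      rw [List.getLast_cons (by simp)]
      have := ih (List.pairwise_cons.1 h).2 (by simp)
      simp only [List.head_cons, List.tail_cons] at this
      simp only [List.head_cons, List.tail_cons, List.zip_cons_cons, List.flatMap_cons]
      rw [PySem.List.pyRange_one_append b c _ (le_of_lt hbc) hlast, this]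

-- pvVal is constant on an elementary segment
theorem pvVal_constant (rs : List (Int × Int × Int)) (p q n : Int)
    (hn : p ≤ n ∧ n < q)
    (hseg : ∀ r ∈ rs, ¬ (p < r.1 ∧ r.1 < q) ∧ ¬ (p < r.2.1 + 1 ∧ r.2.1 + 1 < q)) :
    pvVal rs n = pvVal rs p := by
  unfold pvVal
  have : ∀ (a : Option Int),
      rs.foldl (fun w r => if r.1 ≤ n ∧ n ≤ r.2.1 then some r.2.2 else w) a =
      rs.foldl (fun w r => if r.1 ≤ p ∧ p ≤ r.2.1 then some r.2.2 else w) a := by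
    induction rs with
    | nil => intro a; rfl
    | cons r rest ih =>
      intro a
      have hr := hseg r (List.mem_cons_self ..)
      have hiff : (r.1 ≤ n ∧ n ≤ r.2.1) ↔ (r.1 ≤ p ∧ p ≤ r.2.1) := by omega
      simp only [List.foldl_cons]
      rw [if_congr hiff rfl rfl]
      exact (fun a => ih (fun r' hr' => hseg r' (List.mem_cons_of_mem _ hr')) a) _
  exact this none

-- the covered points, segment by segment
theorem pvPts_concat (rs : List (Int × Int × Int)) (l : List Int) (hpw : l.Pairwise (· < ·))
    (hne : l ≠ [])
    (hseg : ∀ x ∈ l.zip l.tail, ∀ r ∈ rs, ¬ (x.1 < r.1 ∧ r.1 < x.2) ∧ ¬ (x.1 < r.2.1 + 1 ∧ r.2.1 + 1 < x.2)) :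
    pvPtsF (pvVal rs) (l.head hne) (l.getLast hne) =
      (l.zip l.tail).flatMap (fun pq =>
        match pvVal rs pq.1 with
        | none => []
        | some d => (PySem.List.pyRange pq.1 pq.2 1).map (fun n => (n, d))) := by
  unfold pvPtsF
  rw [pvRange_chain l hpw hne, List.filterMap_flatMap]
  refine List.flatMap_congr (fun pq hpq => ?_)
  have hadj := pvZip_adjacent l hpw pq hpq
  have hconst : ∀ n ∈ PySem.List.pyRange pq.1 pq.2 1, pvVal rs n = pvVal rs pq.1 := by
    intro n hn
    have := PySem.List.mem_pyRange_one.1 hn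
    exact pvVal_constant rs pq.1 pq.2 n this (hseg pq hpq)
  rw [List.filterMap_congr (fun n hn => by rw [hconst n hn])]
  cases hv : pvVal rs pq.1 with
  | none => simp
  | some d => simp

-- length of the run continuing expected key ek with value v
def pvCnt (ek v : Int) : List (Int × Int) → Nat
  | [] => 0
  | (m, w) :: rest => if ek = m ∧ v = w then pvCnt (ek + 1) v rest + 1 else 0

-- one coalescing step (merge a piece [p, e] with value v into the output)
def pvStep (out : List (Int × Int × Int)) (p e v : Int) : List (Int × Int × Int) :=
  match out.getLast? with
  | some last => if last.2.1 + 1 = p ∧ last.2.2 = v then out.dropLast ++ [(last.1, e, v)] else out ++ [(p, e, v)]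
  | none => out ++ [(p, e, v)]

def pvRuns : List (Int × Int) → List (Int × Int × Int)
  | [] => []
  | (n, v) :: rest =>
    (n, n + (pvCnt (n + 1) v rest : Int), v) :: pvRuns (rest.drop (pvCnt (n + 1) v rest))
  termination_by L => L.length
  decreasing_by
    simp [List.length_drop]

theorem pvRuns_nil : pvRuns [] = [] := by rw [pvRuns.eq_def]

theorem pvRuns_cons (n v : Int) (rest : List (Int × Int)) :
    pvRuns ((n, v) :: rest) =
      (n, n + (pvCnt (n + 1) v rest : Int), v) :: pvRuns (rest.drop (pvCnt (n + 1) v rest)) := by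
  rw [pvRuns.eq_def]

theorem pvCnt_le_length (L : List (Int × Int)) : ∀ ek v, pvCnt ek v L ≤ L.length := by
  induction L with
  | nil => simp [pvCnt]
  | cons x rest ih =>
    intro ek v
    obtain ⟨m, w⟩ := x
    rw [pvCnt]
    split_ifs with h
    · simpa using ih (ek + 1) v
    · simp

theorem pvCnt_getElem (L : List (Int × Int)) : ∀ ek v (k : Nat), k < pvCnt ek v L → ∀ (hk' : k < L.length), L[k] = (ek + k, v) := by
  induction L with
  | nil => simp [pvCnt]
  | cons x rest ih =>
    intro ek v k hk hk'
    obtain ⟨m, w⟩ := x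
    rw [pvCnt] at hk
    split_ifs at hk with h
    · cases k with
      | zero => simp [← h.1, ← h.2]
      | succ k' =>
        have := ih (ek + 1) v k' (by omega) (by simpa using hk')
        simp only [List.getElem_cons_succ, this, Prod.mk.injEq]
        exact ⟨by omega, trivial⟩
    · omega

-- folding single points into the output, starting from an open last tuple
theorem pvFoldPts_run (L : List (Int × Int)) : ∀ (out : List (Int × Int × Int)) (a last v : Int),
    L.foldl (fun o p => pvStep o p.1 p.1 p.2) (out ++ [(a, last, v)]) =
      out ++ (a, last + (pvCnt (last + 1) v L : Int), v) :: pvRuns (L.drop (pvCnt (last + 1) v L)) := by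
  induction L with
  | nil => simp [pvRuns_nil]
  | cons x rest ih =>
    intro out a last v
    obtain ⟨m, w⟩ := x
    simp only [List.foldl_cons]
    rw [show pvStep (out ++ [(a, last, v)]) m m w =
        if last + 1 = m ∧ v = w then out ++ [(a, m, w)] else (out ++ [(a, last, v)]) ++ [(m, m, w)] from by
      rw [pvStep, List.getLast?_concat]
      simp only [List.dropLast_concat]]
    rw [pvCnt]
    split_ifs with h
    · obtain ⟨h1, h2⟩ := h
      subst h2
      subst h1
      rw [ih out a (last + 1) v]
      simp only [List.drop_succ_cons]
      push_cast
      ring_nf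
    · rw [ih (out ++ [(a, last, v)]) m m w]
      simp only [List.drop_zero, Nat.cast_zero, add_zero, List.append_assoc, List.cons_append,
        List.nil_append]
      rw [pvRuns_cons]

theorem pvFoldPts_eq_pvRuns (L : List (Int × Int)) :
    L.foldl (fun o p => pvStep o p.1 p.1 p.2) [] = pvRuns L := by
  cases L with
  | nil => simp [pvRuns_nil]
  | cons x rest =>
    obtain ⟨n, v⟩ := x
    simp only [List.foldl_cons]
    rw [show pvStep [] n n v = [] ++ [(n, n, v)] from rfl]
    rw [pvFoldPts_run rest [] n n v, pvRuns_cons]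
    rfl

theorem pvCnt_full (cnt : Nat) : ∀ (ek z v : Int), cnt = (z - ek).toNat →
    pvCnt ek v ((PySem.List.pyRange ek z 1).map (fun n => (n, v))) = cnt := by
  induction cnt with
  | zero =>
    intro ek z v h
    rw [PySem.List.pyRange_one_eq_nil (by omega)]
    rfl
  | succ k ih =>
    intro ek z v h
    rw [PySem.List.pyRange_one_cons (by omega), List.map_cons, pvCnt, if_pos ⟨rfl, rfl⟩,
      ih (ek + 1) z v (by omega)]

theorem pvStep_nil (p e v : Int) : pvStep [] p e v = [(p, e, v)] := rfl

theorem pvStep_concat (out : List (Int × Int × Int)) (last : Int × Int × Int) (p e v : Int) :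
    pvStep (out ++ [last]) p e v =
      if last.2.1 + 1 = p ∧ last.2.2 = v then out ++ [(last.1, e, v)]
      else (out ++ [last]) ++ [(p, e, v)] := by
  rw [pvStep, List.getLast?_concat]
  simp only [List.dropLast_concat]

-- folding a covered segment point-by-point is one pvStep of the whole piece
theorem pvSeg_piece (p q d : Int) (hpq : p < q) (out : List (Int × Int × Int)) :
    ((PySem.List.pyRange p q 1).map (fun n => (n, d))).foldl (fun o x => pvStep o x.1 x.1 x.2) out =
      pvStep out p (q - 1) d := by
  rw [PySem.List.pyRange_one_cons hpq, List.map_cons, List.foldl_cons]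
  have hcnt := pvCnt_full (q - (p + 1)).toNat (p + 1) q d rfl
  have hdrop : ((PySem.List.pyRange (p + 1) q 1).map (fun n => (n, d))).drop
      (pvCnt (p + 1) d ((PySem.List.pyRange (p + 1) q 1).map (fun n => (n, d)))) = [] := by
    rw [hcnt, List.drop_eq_nil_iff.2 (by simp [PySem.List.length_pyRange_one])]
  have harith : p + ((q - (p + 1)).toNat : Int) = q - 1 := by omega
  rcases List.eq_nil_or_concat out with rfl | ⟨ys, last, rfl⟩
  · rw [show pvStep [] p p d = [] ++ [(p, p, d)] from rfl]
    rw [pvFoldPts_run _ [] p p d, hdrop, hcnt, pvRuns_nil, pvStep_nil]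
    simp only [List.nil_append, harith]
  · rw [List.concat_eq_append, pvStep_concat, pvStep_concat]
    split_ifs with h
    · rw [show ys ++ [(last.1, p, d)] = ys ++ [(last.1, p, d)] from rfl]
      rw [pvFoldPts_run _ ys last.1 p d, hdrop, hcnt, pvRuns_nil, harith]
    · rw [pvFoldPts_run _ (ys ++ [last]) p p d, hdrop, hcnt, pvRuns_nil, harith]

-- B's segment fold equals the point-by-point fold over the expanded segments
theorem pvBFold (rs : List (Int × Int × Int)) (pairs : List (Int × Int)) :
    (∀ pq ∈ pairs, pq.1 < pq.2) → ∀ out,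
    pairs.foldl (fun output pq =>
      match pvVal rs pq.1 with
      | none => output
      | some d => pvStep output pq.1 (pq.2 - 1) d) out
    = (pairs.flatMap (fun pq =>
        match pvVal rs pq.1 with
        | none => []
        | some d => (PySem.List.pyRange pq.1 pq.2 1).map (fun n => (n, d)))).foldl
        (fun o x => pvStep o x.1 x.1 x.2) out := by
  induction pairs with
  | nil => intro _ out; rfl
  | cons pq rest ih =>
    intro h out
    simp only [List.foldl_cons, List.flatMap_cons, List.foldl_append]
    cases hv : pvVal rs pq.1 with
    | none =>
      dsimp only
      exact ih (fun x hx => h x (List.mem_cons_of_mem _ hx)) out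
    | some d =>
      dsimp only
      rw [pvSeg_piece pq.1 pq.2 d (h pq (List.mem_cons_self ..)) out]
      exact ih (fun x hx => h x (List.mem_cons_of_mem _ hx)) _

theorem pvTreeGet_insert (t : Std.TreeMap Int Int) (k v m : Int) :
    (t.insert k v)[m]? = if m = k then some v else t[m]? := by
  rw [Std.TreeMap.getElem?_insert]
  by_cases h : m = k
  · rw [if_pos (Int.compare_eq_eq.2 h.symm), if_pos h]
  · rw [if_neg (fun hc => h (Int.compare_eq_eq.1 hc).symm), if_neg h]

def pvKeysF (f : Int → Option Int) (lo hi : Int) : List Int :=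
  (PySem.List.pyRange lo hi 1).filter (fun n => (f n).isSome)

def pvInv (d : PvDict) (f : Int → Option Int) (lo hi : Int) : Prop :=
  d.revKeys.reverse = pvKeysF f lo hi ∧ ∀ m, d.val[m]? = f m

theorem pvKeysF_congr {f g : Int → Option Int} (lo hi : Int) (h : ∀ m, f m = g m) :
    pvKeysF f lo hi = pvKeysF g lo hi := by
  unfold pvKeysF
  exact List.filter_congr (fun m _ => by rw [h])

theorem pvKeysF_congr_isSome {f g : Int → Option Int} (lo hi : Int)
    (h : ∀ m, (f m).isSome = (g m).isSome) : pvKeysF f lo hi = pvKeysF g lo hi := by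
  unfold pvKeysF
  exact List.filter_congr (fun m _ => by rw [h])

theorem pvInv_congr {f g : Int → Option Int} (d : PvDict) (lo hi : Int) (h : ∀ m, f m = g m)
    (hInv : pvInv d f lo hi) : pvInv d g lo hi :=
  ⟨by rw [hInv.1, pvKeysF_congr lo hi h], fun m => by rw [hInv.2 m, h m]⟩

theorem pvInv_empty (lo hi : Int) : pvInv PvDict.empty (pvVal []) lo hi := by
  refine ⟨?_, fun m => Std.TreeMap.getElem?_of_isEmpty rfl⟩
  show ([] : List Int).reverse = _
  unfold pvKeysF
  rw [List.reverse_nil, eq_comm, List.filter_eq_nil_iff]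
  intro n _
  simp [pvVal]

theorem pvInsert_one (d : PvDict) (f : Int → Option Int) (lo hi n dta : Int)
    (hInv : pvInv d f lo hi) (hlo : lo ≤ n) (hhi : n < hi)
    (horder : ∀ m, n ≤ m → f m ≠ none → f n ≠ none) :
    pvInv (d.insert n dta) (fun m => if m = n then some dta else f m) lo hi := by
  have hcont : d.val.contains n = (f n).isSome := by
    rw [Std.TreeMap.contains_eq_isSome_getElem?, hInv.2 n]
  have hval : ∀ m, (d.val.insert n dta)[m]? = (fun m => if m = n then some dta else f m) m := by
    intro m
    rw [pvTreeGet_insert, hInv.2 m]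
  cases hfn : f n with
  | some v =>
    rw [PvDict.insert, if_pos (by rw [hcont, hfn]; rfl)]
    refine ⟨?_, hval⟩
    show d.revKeys.reverse = _
    rw [hInv.1]
    refine pvKeysF_congr_isSome lo hi (fun m => ?_)
    by_cases hmn : m = n
    · subst hmn
      simp [hfn]
    · rw [if_neg hmn]
  | none =>
    rw [PvDict.insert, if_neg (by rw [hcont, hfn]; simp)]
    refine ⟨?_, hval⟩
    show (n :: d.revKeys).reverse = _
    rw [List.reverse_cons, hInv.1]
    have hnone : ∀ m, n < m → f m = none := by
      intro m hm
      by_contra hfm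
      exact (horder m (le_of_lt hm) hfm) hfn
    unfold pvKeysF
    dsimp only
    rw [PySem.List.pyRange_one_append lo n hi hlo (le_of_lt hhi),
      PySem.List.pyRange_one_cons hhi]
    simp only [List.filter_append, List.filter_cons]
    have hleft : (PySem.List.pyRange lo n 1).filter (fun m => (if m = n then some dta else f m).isSome)
        = (PySem.List.pyRange lo n 1).filter (fun m => (f m).isSome) := by
      refine List.filter_congr (fun m hm => ?_)
      have := PySem.List.mem_pyRange_one.1 hm
      rw [if_neg (by omega)]
    have hr0 : (PySem.List.pyRange (n+1) hi 1).filter (fun m => (f m).isSome) = [] := by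
      rw [List.filter_eq_nil_iff]
      intro m hm
      have := PySem.List.mem_pyRange_one.1 hm
      rw [hnone m (by omega)]
      simp
    have hr1 : (PySem.List.pyRange (n+1) hi 1).filter (fun m => (if m = n then some dta else f m).isSome) = [] := by
      rw [List.filter_eq_nil_iff]
      intro m hm
      have := PySem.List.mem_pyRange_one.1 hm
      rw [if_neg (by omega), hnone m (by omega)]
      simp
    rw [hleft, hr0, hr1]
    simp [hfn]

theorem pvInsert_range (cnt : Nat) : ∀ (a e dta lo hi : Int) (f : Int → Option Int) (d : PvDict),
    cnt = (e + 1 - a).toNat → lo ≤ a → e < hi →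
    pvInv d f lo hi →
    (∀ n m, a ≤ n → n ≤ m → f m ≠ none → f n ≠ none) →
    pvInv ((PySem.List.pyRange a (e+1) 1).foldl (fun d n => d.insert n dta) d)
      (fun m => if a ≤ m ∧ m ≤ e then some dta else f m) lo hi := by
  induction cnt with
  | zero =>
    intro a e dta lo hi f d hcnt hlo hhi hd _
    rw [PySem.List.pyRange_one_eq_nil (by omega)]
    simp only [List.foldl_nil]
    exact pvInv_congr d lo hi (fun m => by rw [if_neg (by omega)]) hd
  | succ k ih =>
    intro a e dta lo hi f d hcnt hlo hhi hd hH
    rw [PySem.List.pyRange_one_cons (by omega), List.foldl_cons]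
    have h1 := pvInsert_one d f lo hi a dta hd hlo (by omega) (fun m hm hfm => hH a m le_rfl hm hfm)
    have h2 := ih (a+1) e dta lo hi (fun m => if m = a then some dta else f m) (d.insert a dta)
      (by omega) (by omega) hhi h1 ?_
    · refine pvInv_congr _ lo hi (fun m => ?_) h2
      dsimp only
      by_cases h3 : a + 1 ≤ m ∧ m ≤ e
      · rw [if_pos h3, if_pos (by omega)]
      · rw [if_neg h3]
        by_cases h4 : m = a
        · rw [if_pos h4, if_pos (by omega)]
        · rw [if_neg h4, if_neg (by omega)]
    · intro n m hn hm hfm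
      dsimp only at hfm ⊢
      rw [if_neg (by omega)] at hfm ⊢
      exact hH n m (by omega) hm hfm

theorem pvDict_items : ∀ (rest ps : List (Int × Int × Int)) (d : PvDict) (lo hi : Int),
    pvInv d (pvVal ps) lo hi →
    (∀ r ∈ ps, ∀ r' ∈ rest, r.1 ≤ r'.1) →
    rest.Pairwise (fun a b => a.1 ≤ b.1) →
    (∀ r ∈ rest, lo ≤ r.1 ∧ r.2.1 < hi) →
    pvInv (rest.foldl (fun d r => (PySem.List.pyRange r.1 (r.2.1 + 1) 1).foldl (fun d n => d.insert n r.2.2) d) d)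
      (pvVal (ps ++ rest)) lo hi := by
  intro rest
  induction rest with
  | nil =>
    intro ps d lo hi hd _ _ _
    simpa using hd
  | cons r rest ih =>
    intro ps d lo hi hd hps hpw hbound
    simp only [List.foldl_cons]
    have hH : ∀ n m, r.1 ≤ n → n ≤ m → pvVal ps m ≠ none → pvVal ps n ≠ none := by
      intro n m hn hm hfm
      rw [Ne, pvVal_eq_none_iff] at hfm ⊢
      push Not at hfm ⊢
      rcases hfm with ⟨r', hr', h1, h2⟩
      have := hps r' hr' r (List.mem_cons_self ..)
      exact ⟨r', hr', by omega, by omega⟩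
    have hb := hbound r (List.mem_cons_self ..)
    have h1 := pvInsert_range (r.2.1 + 1 - r.1).toNat r.1 r.2.1 r.2.2 lo hi (pvVal ps) d rfl
      hb.1 hb.2 hd hH
    have h2 : pvInv ((PySem.List.pyRange r.1 (r.2.1 + 1) 1).foldl (fun d n => d.insert n r.2.2) d)
        (pvVal (ps ++ [r])) lo hi :=
      pvInv_congr _ lo hi (fun m => (pvVal_append_singleton ps r m).symm) h1
    have h3 := ih (ps ++ [r]) _ lo hi h2 ?_ hpw.of_cons ?_
    · simpa using h3
    · intro r' hr' r'' hr''
      rcases List.mem_append.1 hr' with h | h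
      · exact hps r' h r'' (List.mem_cons_of_mem _ hr'')
      · simp at h
        subst h
        exact (List.pairwise_cons.1 hpw).1 r'' hr''
    · exact fun r' hr' => hbound r' (List.mem_cons_of_mem _ hr')

theorem pvItems_of_inv (d : PvDict) (f : Int → Option Int) (lo hi : Int)
    (h : pvInv d f lo hi) : d.items = pvPtsF f lo hi := by
  rw [PvDict.items, h.1]
  have hget : ∀ k, d.val.getD k 0 = (f k).getD 0 := by
    intro k
    rw [Std.TreeMap.getD_eq_getD_getElem?, h.2 k]
  unfold pvKeysF pvPtsF
  generalize PySem.List.pyRange lo hi 1 = L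
  induction L with
  | nil => rfl
  | cons x rest ihl =>
    rw [List.filter_cons, List.filterMap_cons]
    cases hfx : f x with
    | none => simp [ihl]
    | some v =>
      simp only [Option.isSome_some, if_pos, List.map_cons, Option.map_some]
      rw [ihl]
      simp [hget x, hfx]

-- bridge: Array.getD on a list's array is List.getD
theorem pvArr_getD (xs : List (Int × Int)) (j : Nat) (d : Int × Int) :
    (xs.toArray).getD j d = xs.getD j d := by
  unfold Array.getD List.getD
  split_ifs with h
  · simp only [List.size_toArray] at h
    rw [List.getElem?_eq_getElem h]
    simp
  · simp only [List.size_toArray, Nat.not_lt] at h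
    rw [List.getElem?_eq_none h]
    rfl

-- A's inner while loop advances exactly over the run counted by pvCnt
theorem pvAInner_spec (nums : List (Int × Int)) : ∀ (fuel : Nat) (j : Nat) (curn curv di : Int),
    j ≤ nums.length → nums.length - j < fuel →
    pvAInner nums.toArray (nums.length : Int) curn curv (j : Int) di fuel =
      ((j : Int) + (pvCnt (curn + di) curv (nums.drop j) : Int),
        di + (pvCnt (curn + di) curv (nums.drop j) : Int)) := by
  intro fuel
  induction fuel with
  | zero => omega
  | succ k ih =>
    intro j curn curv di hj hfuel
    rw [pvAInner]
    by_cases hjl : j = nums.length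
    · subst hjl
      rw [List.drop_length]
      simp [pvCnt]
    · have hjl' : j < nums.length := by omega
      have hget : (nums.toArray).getD ((j : Int)).toNat (0, 0) = nums[j] := by
        rw [Int.toNat_natCast, pvArr_getD]
        exact List.getD_eq_getElem nums (0, 0) hjl'
      rw [hget]
      have hdrop : nums.drop j = nums[j] :: nums.drop (j + 1) :=
        (List.getElem_cons_drop hjl').symm
      rw [hdrop, pvCnt]
      have hne : (j : Int) ≠ (nums.length : Int) := by
        intro h
        exact hjl (by exact_mod_cast h)
      by_cases hc : curn + di = nums[j].1 ∧ curv = nums[j].2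
      · rw [if_pos ⟨hne, hc⟩, if_pos hc]
        have harg : (j : Int) + 1 = ((j + 1 : Nat) : Int) := by push_cast; ring
        rw [harg, ih (j + 1) curn curv (di + 1) (by omega) (by omega)]
        rw [show curn + (di + 1) = curn + di + 1 from by ring]
        rw [Prod.mk.injEq]
        constructor <;> push_cast <;> omega
      · rw [if_neg (fun h => hc h.2), if_neg hc]
        simp

theorem pvCnt_cons (ek v : Int) (x : Int × Int) (rest : List (Int × Int)) :
    pvCnt ek v (x :: rest) = if ek = x.1 ∧ v = x.2 then pvCnt (ek + 1) v rest + 1 else 0 := by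
  obtain ⟨m, w⟩ := x
  rfl

theorem pvRuns_cons' (x : Int × Int) (rest : List (Int × Int)) :
    pvRuns (x :: rest) =
      (x.1, x.1 + (pvCnt (x.1 + 1) x.2 rest : Int), x.2) :: pvRuns (rest.drop (pvCnt (x.1 + 1) x.2 rest)) := by
  obtain ⟨m, w⟩ := x
  rw [pvRuns_cons]

-- A's outer while loop produces the runs of the remaining suffix
theorem pvAOuter_spec (nums : List (Int × Int)) : ∀ (fuel : Nat) (j : Nat) (out : List (Int × Int × Int)),
    j ≤ nums.length → nums.length - j ≤ fuel →
    pvAOuter nums.toArray (nums.length : Int) (j : Int) out fuel = out ++ pvRuns (nums.drop j) := by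
  intro fuel
  induction fuel with
  | zero =>
    intro j out hj hfuel
    have : j = nums.length := by omega
    subst this
    rw [pvAOuter, List.drop_length, pvRuns_nil, List.append_nil]
  | succ k ih =>
    intro j out hj hfuel
    rw [pvAOuter]
    simp only [List.size_toArray]
    by_cases hjl : j = nums.length
    · subst hjl
      rw [if_neg (by omega), List.drop_length, pvRuns_nil, List.append_nil]
    · have hjl' : j < nums.length := by omega
      rw [if_pos (by exact_mod_cast hjl')]
      have hget : (nums.toArray).getD ((j : Int)).toNat (0, 0) = nums[j] := by
        rw [Int.toNat_natCast, pvArr_getD]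
        exact List.getD_eq_getElem nums (0, 0) hjl'
      have hdrop : nums.drop j = nums[j] :: nums.drop (j + 1) :=
        (List.getElem_cons_drop hjl').symm
      set c := pvCnt (nums[j].1 + 1) nums[j].2 (nums.drop (j + 1)) with hcdef
      have hcle := pvCnt_le_length (nums.drop (j + 1)) (nums[j].1 + 1) nums[j].2
      rw [List.length_drop] at hcle
      have hinner := pvAInner_spec nums (nums.length + 1) j nums[j].1 nums[j].2 0 (by omega) (by omega)
      rw [hdrop, add_zero, pvCnt_cons, if_pos ⟨rfl, rfl⟩] at hinner
      simp only [hget, hinner, ← hcdef]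
      -- the end of the run: nums[j + c]
      have hjc : j + c < nums.length := by omega
      have hr1 : (j : Int) + ((c + 1 : Nat) : Int) - 1 = ((j + c : Nat) : Int) := by push_cast; ring
      have hend : ((nums.toArray).getD (((j : Int) + ((c + 1 : Nat) : Int) - 1)).toNat (0, 0)).1 = nums[j].1 + (c : Int) := by
        rw [hr1, Int.toNat_natCast, pvArr_getD, List.getD_eq_getElem nums (0, 0) hjc]
        rcases Nat.eq_zero_or_pos c with hc0 | hcpos
        · simp only [hc0, Nat.cast_zero, add_zero]
        · have hlt : c - 1 < (nums.drop (j + 1)).length := by rw [List.length_drop]; omega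
          have hrun := pvCnt_getElem (nums.drop (j + 1)) (nums[j].1 + 1) nums[j].2 (c - 1) (by omega) hlt
          have hconv : nums[j + c]'hjc = (nums.drop (j + 1))[c - 1]'hlt := by
            rw [List.getElem_drop]
            congr 1
            omega
          rw [hconv, hrun]
          dsimp only
          omega
      rw [hend]
      have hidx : (j : Int) + ((c + 1 : Nat) : Int) = ((j + c + 1 : Nat) : Int) := by push_cast; ring
      rw [hidx, ih (j + c + 1) _ (by omega) (by omega)]
      rw [hdrop, pvRuns_cons', ← hcdef]
      rw [List.drop_drop]
      have h2 : j + 1 + c = j + c + 1 := by omega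
      rw [h2]
      simp

theorem pv_main (ranges : List (Int × Int × Int)) :
    brute_force_discretize ranges = brute_force_discretize_alt ranges := by
  rcases hrs : PySem.List.sorted2 ranges (fun x => x.1) (fun x => -x.2.1) with _ | ⟨r0, rs'⟩
  · -- no ranges at all
    show pvAOuter _ _ 0 [] _ = _
    rw [brute_force_discretize_alt]
    simp only [hrs]
    rfl
  · set rs := PySem.List.sorted2 ranges (fun x => x.1) (fun x => -x.2.1) with hrsdef
    have hrsne : rs ≠ [] := by rw [hrs]; simp
    have hpwstart : rs.Pairwise (fun a b => a.1 ≤ b.1) := pvSorted2_pairwise ranges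
    set bl := rs.flatMap (fun r => [r.1, r.2.1 + 1]) with hbl
    set bounds := PySem.List.sorted (PySem.Set.ofList bl) (fun b => b) with hbounds
    have hpw : bounds.Pairwise (· < ·) := PySem.List.sorted_ofList_pairwise_lt bl
    have hmem : ∀ x, x ∈ bounds ↔ x ∈ bl := by
      intro x
      rw [hbounds, PySem.List.mem_sorted, PySem.Set.mem_ofList]
    have hbne : bounds ≠ [] := by
      intro h
      have : r0.1 ∈ bounds := by
        rw [hmem, hbl, List.mem_flatMap]
        exact ⟨r0, by rw [hrs]; exact List.mem_cons_self .., by simp⟩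
      rw [h] at this
      simp at this
    set lo := bounds.head hbne with hlo
    set hi := bounds.getLast hbne with hhi
    have hlomem : ∀ x ∈ bounds, lo ≤ x := by
      intro x hx
      rcases bounds with _ | ⟨b, rest⟩
      · simp at hx
      · exact pvPairwise_head_le b rest hpw x hx
    have hhimem : ∀ x ∈ bounds, x ≤ hi := pvPairwise_getLast_ge bounds hpw hbne
    have hrb : ∀ r ∈ rs, r.1 ∈ bounds ∧ r.2.1 + 1 ∈ bounds := by
      intro r hr
      constructor <;> (rw [hmem, hbl, List.mem_flatMap]; exact ⟨r, hr, by simp⟩)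
    -- A-side: the dict's items are exactly the covered points with their winning values
    have hnums : (rs.foldl (fun d r => (PySem.List.pyRange r.1 (r.2.1 + 1) 1).foldl (fun d n => d.insert n r.2.2) d) PvDict.empty).items
        = pvPtsF (pvVal rs) lo hi := by
      have h1 := pvDict_items rs [] PvDict.empty lo hi (pvInv_empty lo hi) (by simp) hpwstart ?_
      · exact pvItems_of_inv _ _ lo hi (by simpa using h1)
      · intro r hr
        exact ⟨hlomem r.1 (hrb r hr).1, by have := hhimem _ (hrb r hr).2; omega⟩
    -- the covered points split into the elementary segments
    have hsegs : pvPtsF (pvVal rs) lo hi = ((bounds.zip bounds.tail).flatMap (fun pq =>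
        match pvVal rs pq.1 with
        | none => []
        | some d => (PySem.List.pyRange pq.1 pq.2 1).map (fun n => (n, d)))) := by
      rw [hlo, hhi]
      refine pvPts_concat rs bounds hpw hbne ?_
      intro x hx r hr
      have hadj := pvZip_adjacent bounds hpw x hx
      exact ⟨fun h => hadj.2 r.1 (hrb r hr).1 ⟨h.1, h.2⟩, fun h => hadj.2 (r.2.1 + 1) (hrb r hr).2 ⟨h.1, h.2⟩⟩
    -- assemble
    show pvAOuter _ _ 0 [] _ = _
    have hzero : (0 : Int) = ((0 : Nat) : Int) := rfl
    rw [hzero, pvAOuter_spec _ _ 0 [] (by omega) (by omega), List.drop_zero, List.nil_append]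
    rw [hnums, hsegs, ← pvFoldPts_eq_pvRuns]
    rw [← pvBFold rs (bounds.zip bounds.tail) (fun pq hpq => (pvZip_adjacent bounds hpw pq hpq).1) []]
    rfl

-- ===== VERDICT (by name: the statement is the Claim_ definition above) =====
theorem brute_force_discretize_spec : Claim_equal_brute_force_discretize := by
  intro ranges _
  exact pv_main ranges
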